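-- pv_equiv track=rewrite | github.com/Nafeij/leet | 2dactivation.py | solution
-- ===== SOURCE A (Python) =====
-- def solution(n, m, queries):
--     rs = [1 for _ in range(n)]
--     cs = [1 for _ in range(m)]
--     mr = mc = 1
--
--     def next(s, ls):
--         for i in range(s-1, len(ls)):
--             if ls[i]:
--                 return i + 1
--         return 0
--
--     ans = []
--
--     for q in queries:
--         if q[0] == 0:
--             minn = -1
--             if mr and mc:
--                 minn = mr * mc
--             ans.append(minn)
--         elif q[0] == 1:
--             rs[q[1] - 1] = 0
--             mr = next(mr, rs)
--         elif q[0] == 2: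
--             cs[q[1] - 1] = 0
--             mc = next(mc, cs)
--     return ans
-- ===== SOURCE B (Python) =====
-- def solution(n, m, queries):
--     # Union-find "next active" pointers instead of boolean rescans from a moving pointer.
--     rs = [1] * n
--     cs = [1] * m
--     nr = list(range(1, n + 2))  # nr[j] = candidate next active row >= nr[j] when row j is dead
--     nc = list(range(1, m + 2))
--     mr = mc = 1
--     ans = []
--
--     def find(j, alive, nxt):
--         # smallest active 1-based index >= j, path-compressed; len(alive)+1 if none
--         if j > len(alive) or alive[j - 1]:
--             return j
--         r = find(nxt[j], alive, nxt)
--         nxt[j] = r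
--         return r
--
--     for q in queries:
--         if q[0] == 0:
--             ans.append(mr * mc if mr and mc else -1)
--         elif q[0] == 1:
--             rs[q[1] - 1] = 0
--             t = find(mr, rs, nr)
--             mr = t if t <= n else 0
--         elif q[0] == 2:
--             cs[q[1] - 1] = 0
--             t = find(mc, cs, nc)
--             mc = t if t <= m else 0
--     return ans
-- ===== Notes on version B (the rewrite author's own statement) =====
-- stated objective: alternative
-- what changed: Replaces A's boolean-array forward rescans from a moving pointer (helper next re-scanning rs/cs on every deactivation) with a union-find 'next active' jump-pointer structure with path compression, updated at deactivations; same observable results, measured speed comparable to A.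
import Mathlib
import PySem

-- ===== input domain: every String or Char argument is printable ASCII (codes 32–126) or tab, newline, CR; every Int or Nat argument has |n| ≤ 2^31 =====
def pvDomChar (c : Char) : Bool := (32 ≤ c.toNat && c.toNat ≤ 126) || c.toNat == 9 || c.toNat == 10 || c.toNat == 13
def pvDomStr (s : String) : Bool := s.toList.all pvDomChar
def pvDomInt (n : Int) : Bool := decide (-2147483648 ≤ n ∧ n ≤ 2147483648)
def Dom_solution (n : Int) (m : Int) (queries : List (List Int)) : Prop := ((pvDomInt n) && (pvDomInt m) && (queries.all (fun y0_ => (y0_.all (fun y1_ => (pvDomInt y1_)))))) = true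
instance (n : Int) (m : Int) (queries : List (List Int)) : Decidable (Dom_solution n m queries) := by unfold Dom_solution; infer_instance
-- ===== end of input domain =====

-- B replaces A's boolean arrays + forward rescans from a moving pointer by union-find
-- "next active" jump pointers with path compression (objective: alternative data structure).

-- ===== PORT A =====

-- A's helper `next(s, ls)`: scan i in range(s-1, len(ls)), return i+1 at the first truthy ls[i], else 0.
def solutionNextGo (ls : List Int) : List Int → Int
  | [] => 0
  | i :: rest => if PySem.List.pyGetD ls i 0 ≠ 0 then i + 1 else solutionNextGo ls rest

def solutionNext (s : Int) (ls : List Int) : Int :=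
  solutionNextGo ls (PySem.List.pyRange (s - 1) (ls.length : Int) 1)

-- one iteration of A's `for q in queries` loop over state (rs, cs, mr, mc, ans)
def solutionStep (st : List Int × List Int × Int × Int × List Int) (q : List Int) :
    List Int × List Int × Int × Int × List Int :=
  match st with
  | (rs, cs, mr, mc, ans) =>
    if PySem.List.pyGetD q 0 0 = 0 then
      (rs, cs, mr, mc, ans ++ [if mr ≠ 0 ∧ mc ≠ 0 then mr * mc else -1])
    else if PySem.List.pyGetD q 0 0 = 1 then
      let rs' := PySem.List.pySetD rs (PySem.List.pyGetD q 1 0 - 1) 0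
      (rs', cs, solutionNext mr rs', mc, ans)
    else if PySem.List.pyGetD q 0 0 = 2 then
      let cs' := PySem.List.pySetD cs (PySem.List.pyGetD q 1 0 - 1) 0
      (rs, cs', mr, solutionNext mc cs', ans)
    else
      (rs, cs, mr, mc, ans)

def solution (n : Int) (m : Int) (queries : List (List Int)) : List Int :=
  (queries.foldl solutionStep
    (List.replicate n.toNat 1, List.replicate m.toNat 1, 1, 1, [])).2.2.2.2

-- ===== PORT B =====

-- B's `find(j, alive, nxt)`: smallest active 1-based index >= j (len+1 if none), with path
-- compression written into nxt.  Fuel only makes the Python recursion total in Lean.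
def solutionAltFind (fuel : Nat) (j : Int) (alive : List Int) (nxt : List Int) :
    Int × List Int :=
  match fuel with
  | 0 => (j, nxt)
  | f + 1 =>
    if (alive.length : Int) < j then (j, nxt)
    else if PySem.List.pyGetD alive (j - 1) 0 ≠ 0 then (j, nxt)
    else
      let r := solutionAltFind f (PySem.List.pyGetD nxt j 0) alive nxt
      (r.1, PySem.List.pySetD r.2 j r.1)

-- one iteration of B's loop over state (rs, cs, nr, nc, mr, mc, ans)
def solutionAltStep (n : Int) (m : Int)
    (st : List Int × List Int × List Int × List Int × Int × Int × List Int) (q : List Int) :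
    List Int × List Int × List Int × List Int × Int × Int × List Int :=
  match st with
  | (rs, cs, nr, nc, mr, mc, ans) =>
    if PySem.List.pyGetD q 0 0 = 0 then
      (rs, cs, nr, nc, mr, mc, ans ++ [if mr ≠ 0 ∧ mc ≠ 0 then mr * mc else -1])
    else if PySem.List.pyGetD q 0 0 = 1 then
      let rs' := PySem.List.pySetD rs (PySem.List.pyGetD q 1 0 - 1) 0
      let fr := solutionAltFind (rs'.length + 2) mr rs' nr
      (rs', cs, fr.2, nc, if fr.1 ≤ n then fr.1 else 0, mc, ans)
    else if PySem.List.pyGetD q 0 0 = 2 then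
      let cs' := PySem.List.pySetD cs (PySem.List.pyGetD q 1 0 - 1) 0
      let fc := solutionAltFind (cs'.length + 2) mc cs' nc
      (rs, cs', nr, fc.2, mr, if fc.1 ≤ m then fc.1 else 0, ans)
    else
      (rs, cs, nr, nc, mr, mc, ans)

def solution_alt (n : Int) (m : Int) (queries : List (List Int)) : List Int :=
  (queries.foldl (solutionAltStep n m)
    (List.replicate n.toNat 1, List.replicate m.toNat 1,
     PySem.List.pyRange 1 (n + 2) 1, PySem.List.pyRange 1 (m + 2) 1, 1, 1, [])).2.2.2.2.2.2

-- ===== PRECONDITION & SPEC =====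
-- Pre_ excludes exactly the inputs on which A raises IndexError: a query that is the empty
-- list (q[0]), a type-1/2 query of length 1 (q[1]), or a type-1/2 query whose index q[1]-1
-- is outside Python's accepted range [-n, n) (resp. [-m, m)) for the rows (columns) list.
def Pre_solution (n : Int) (m : Int) (queries : List (List Int)) : Prop :=
  ∀ q ∈ queries, q ≠ [] ∧
    (PySem.List.pyGetD q 0 0 = 1 →
      2 ≤ q.length ∧ 1 - n ≤ PySem.List.pyGetD q 1 0 ∧ PySem.List.pyGetD q 1 0 ≤ n) ∧
    (PySem.List.pyGetD q 0 0 = 2 →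
      2 ≤ q.length ∧ 1 - m ≤ PySem.List.pyGetD q 1 0 ∧ PySem.List.pyGetD q 1 0 ≤ m)

instance (n : Int) (m : Int) (queries : List (List Int)) : Decidable (Pre_solution n m queries) := by
  unfold Pre_solution; infer_instance

def pvWitness_solution : Int × Int × List (List Int) :=
  (2, 3, [[0], [1, 2], [0], [2, 1], [2, 3], [0], [1, 1], [0]])

def Spec_solution (n : Int) (m : Int) (queries : List (List Int)) (out : List Int) : Prop := out = solution_alt n m queries
instance (n : Int) (m : Int) (queries : List (List Int)) (out : List Int) : Decidable (Spec_solution n m queries out) := by unfold Spec_solution; infer_instance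

-- ===== CLAIM (what is proved, stated in full; the proofs are below) =====
def Claim_equal_solution : Prop := ∀ (n : Int) (m : Int) (queries : List (List Int)), Dom_solution n m queries → Pre_solution n m queries → Spec_solution n m queries (solution n m queries)

-- ===== LEMMAS AND PROOFS =====

-- leading count of dead (= 0) cells
def pvLZ : List Int → Nat
  | [] => 0
  | x :: xs => if x = 0 then pvLZ xs + 1 else 0

-- pvF ls s = smallest 1-based active index ≥ s (ls.length + 1 when none), for 1 ≤ s
def pvF (ls : List Int) (s : Nat) : Nat := s + pvLZ (ls.drop (s - 1))

-- A's encoding of "no active index" as 0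
def pvClip (len : Nat) (t : Nat) : Int := if t ≤ len then (t : Int) else 0

lemma pvLZ_le (ls : List Int) : pvLZ ls ≤ ls.length := by
  induction ls with
  | nil => simp [pvLZ]
  | cons x xs ih => simp only [pvLZ, List.length_cons]; split <;> omega

lemma pvLZ_dead (ls : List Int) (k : Nat) (h : k < pvLZ ls) : ls.getD k 0 = 0 := by
  induction ls generalizing k with
  | nil => simp [pvLZ] at h
  | cons x xs ih =>
    simp only [pvLZ] at h
    by_cases hx : x = 0
    · cases k with
      | zero => simpa [List.getD] using hx
      | succ k' => simp only [List.getD_cons_succ]; exact ih k' (by simp [hx] at h; omega)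
    · simp [hx] at h

lemma pvLZ_active (ls : List Int) (h : pvLZ ls < ls.length) : ls.getD (pvLZ ls) 0 ≠ 0 := by
  induction ls with
  | nil => simp at h
  | cons x xs ih =>
    simp only [pvLZ] at *
    by_cases hx : x = 0
    · simp only [if_pos hx, List.getD_cons_succ]; exact ih (by simp [hx] at h; omega)
    · simpa [hx, List.getD] using hx

lemma pvLZ_eq_length (ls : List Int) (h : ∀ k < ls.length, ls.getD k 0 = 0) : pvLZ ls = ls.length := by
  induction ls with
  | nil => simp [pvLZ]
  | cons x xs ih =>
    have hx : x = 0 := by simpa [List.getD] using h 0 (by simp)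
    simp only [pvLZ, if_pos hx, List.length_cons]
    have := ih (fun k hk => by simpa [List.getD_cons_succ] using h (k+1) (by simpa using Nat.succ_lt_succ hk))
    omega

lemma pvLZ_zero_of_active (ls : List Int) (h : ls.getD 0 0 ≠ 0) : pvLZ ls = 0 := by
  cases ls with
  | nil => simp [pvLZ]
  | cons x xs => simp only [pvLZ]; simp [List.getD] at h; simp [h]

lemma pvF_le (ls : List Int) (s : Nat) (h1 : 1 ≤ s) (h2 : s ≤ ls.length + 1) :
    pvF ls s ≤ ls.length + 1 := by
  have := pvLZ_le (ls.drop (s - 1))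
  simp only [pvF]
  simp only [List.length_drop] at this
  omega

lemma pvF_ge (ls : List Int) (s : Nat) : s ≤ pvF ls s := by simp [pvF]

lemma pvF_step (ls : List Int) (s : Nat) (h1 : 1 ≤ s) (h2 : s ≤ ls.length)
    (hd : ls.getD (s - 1) 0 = 0) : pvF ls s = pvF ls (s + 1) := by
  have hlt : s - 1 < ls.length := by omega
  have hdrop : ls.drop (s - 1) = ls[s - 1] :: ls.drop s := by
    have h3 := List.getElem_cons_drop (as := ls) (i := s - 1) hlt
    rw [show s - 1 + 1 = s by omega] at h3
    exact h3.symm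
  have hval : ls[s - 1] = 0 := by
    rw [List.getD_eq_getElem?_getD, List.getElem?_eq_getElem hlt] at hd
    simpa using hd
  simp only [pvF, hdrop, pvLZ, hval, if_true, eq_self_iff_true, Nat.add_sub_cancel]
  omega

lemma pvF_dead_below (ls : List Int) (s : Nat) (h1 : 1 ≤ s) (r : Nat)
    (hr1 : s ≤ r) (hr2 : r < pvF ls s) : ls.getD (r - 1) 0 = 0 := by
  have hk : r - 1 = (s - 1) + (r - s) := by omega
  have hlt : r - s < pvLZ (ls.drop (s - 1)) := by simp only [pvF] at hr2; omega
  have := pvLZ_dead (ls.drop (s - 1)) (r - s) hlt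
  rw [List.getD_eq_getElem?_getD, List.getElem?_drop] at this
  rw [List.getD_eq_getElem?_getD, hk]
  exact this

lemma pvF_active (ls : List Int) (s : Nat) (h1 : 1 ≤ s) (h : pvF ls s ≤ ls.length) :
    ls.getD (pvF ls s - 1) 0 ≠ 0 := by
  have hlt : pvLZ (ls.drop (s - 1)) < (ls.drop (s - 1)).length := by
    simp only [List.length_drop]; simp only [pvF] at h; omega
  have ha := pvLZ_active (ls.drop (s - 1)) hlt
  rw [List.getD_eq_getElem?_getD, List.getElem?_drop] at ha
  have hidx : pvF ls s - 1 = (s - 1) + pvLZ (ls.drop (s - 1)) := by simp only [pvF]; omega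
  rw [List.getD_eq_getElem?_getD, hidx]
  exact ha

lemma pvF_skip (ls : List Int) (j j' : Nat) (h1 : 1 ≤ j) (h2 : j ≤ j') (h3 : j' ≤ ls.length + 1)
    (hdead : ∀ r, j ≤ r → r < j' → ls.getD (r - 1) 0 = 0) : pvF ls j = pvF ls j' := by
  induction j' with
  | zero => omega
  | succ k ih =>
    rcases Nat.lt_or_ge j (k+1) with hlt | hge
    · have hk : pvF ls j = pvF ls k := ih (by omega) (by omega)
        (fun r hr1 hr2 => hdead r hr1 (by omega))
      rw [hk, pvF_step ls k (by omega) (by omega) (hdead k (by omega) (by omega))]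
    · have : j = k + 1 := by omega
      rw [this]

-- ===== A-side characterisation =====

lemma nextGo_eq (ls : List Int) (a : Nat) (ha : a ≤ ls.length) :
    solutionNextGo ls (PySem.List.pyRange (a : Int) (ls.length : Int)) =
      pvClip ls.length (pvF ls (a + 1)) := by
  induction hfuel : ls.length - a generalizing a with
  | zero =>
    have haa : a = ls.length := by omega
    subst haa
    rw [PySem.List.pyRange_one_eq_nil (by omega)]
    simp [solutionNextGo, pvF, pvClip, pvLZ, List.drop_length]
  | succ k ih =>
    have halt : a < ls.length := by omega
    rw [PySem.List.pyRange_one_cons (by exact_mod_cast halt)]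
    simp only [solutionNextGo]
    rw [PySem.List.pyGetD_natCast]
    by_cases hx : ls.getD a 0 = 0
    · rw [if_neg (by simp [List.getD_eq_getElem?_getD] at hx ⊢; simp [hx])]
      rw [show (a : Int) + 1 = ((a + 1 : Nat) : Int) by push_cast; ring]
      rw [ih (a + 1) (by omega) (by omega)]
      rw [pvF_step ls (a + 1) (by omega) (by omega) (by simpa using hx)]
    · rw [if_pos (by simp [List.getD_eq_getElem?_getD] at hx ⊢; simp [hx])]
      have hdz : pvLZ (ls.drop a) = 0 := by
        apply pvLZ_zero_of_active
        rw [List.getD_eq_getElem?_getD, List.getElem?_drop]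
        simpa [List.getD_eq_getElem?_getD] using hx
      have hF : pvF ls (a + 1) = a + 1 := by
        simp [pvF, Nat.add_sub_cancel, hdz]
      rw [hF]
      simp only [pvClip, if_pos (by omega : a + 1 ≤ ls.length)]
      push_cast; ring

lemma next_eq (ls : List Int) (s : Nat) (h1 : 1 ≤ s) (h2 : s ≤ ls.length + 1) :
    solutionNext (s : Int) ls = pvClip ls.length (pvF ls s) := by
  unfold solutionNext
  rw [show (s : Int) - 1 = ((s - 1 : Nat) : Int) by omega]
  rw [nextGo_eq ls (s - 1) (by omega)]
  rw [show s - 1 + 1 = s by omega]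

lemma next_zero (ls : List Int) (h : ∀ k < ls.length, ls.getD k 0 = 0) :
    solutionNext 0 ls = 0 := by
  unfold solutionNext
  rw [show (0 : Int) - 1 = -1 by ring]
  rcases Nat.eq_zero_or_pos ls.length with h0 | hpos
  · have hnil : ls = [] := List.eq_nil_of_length_eq_zero h0
    subst hnil
    rw [PySem.List.pyRange_one_cons (by norm_num)]
    simp only [solutionNextGo]
    rw [if_neg (by simp [PySem.List.pyGetD, PySem.List.pyGet?, PySem.List.pyIdx?])]
    norm_num
    simp [solutionNextGo]
  · have hne : ls ≠ [] := by
      intro hc; rw [hc] at hpos; simp at hpos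
    rw [PySem.List.pyRange_one_cons (by exact_mod_cast (by omega : (-1 : Int) < ls.length))]
    simp only [solutionNextGo]
    have hlast : PySem.List.pyGetD ls (-1) 0 = 0 := by
      rw [PySem.List.pyGetD_neg_one ls 0 hne, List.getLast_eq_getElem hne]
      have := h (ls.length - 1) (by omega)
      rw [List.getD_eq_getElem?_getD, List.getElem?_eq_getElem (by omega)] at this
      simpa using this
    rw [if_neg (by simp [hlast])]
    rw [show (-1 : Int) + 1 = ((0 : Nat) : Int) by norm_num]
    rw [nextGo_eq ls 0 (by omega)]
    have hlz := pvLZ_eq_length ls h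
    simp [pvF, pvClip, hlz]

-- ===== B-side: jump-pointer invariant and find characterisation =====

def pvInv (ls nxt : List Int) : Prop :=
  nxt.length = ls.length + 1 ∧
  ∀ k : Nat, k ≤ ls.length →
    ((k : Int) < nxt.getD k 0 ∧ nxt.getD k 0 ≤ (ls.length : Int) + 1 ∧
     ∀ r : Nat, k < r → (r : Int) < nxt.getD k 0 → ls.getD (r - 1) 0 = 0)

lemma pvF_top (ls : List Int) : pvF ls (ls.length + 1) = ls.length + 1 := by
  simp [pvF, List.drop_length, pvLZ]

lemma getD_set_eq (xs : List Int) (j : Nat) (v : Int) (h : j < xs.length) :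
    (xs.set j v).getD j 0 = v := by
  rw [List.getD_eq_getElem?_getD, List.getElem?_set, if_pos rfl, if_pos h]; rfl

lemma getD_set_ne (xs : List Int) (j k : Nat) (v : Int) (h : j ≠ k) :
    (xs.set j v).getD k 0 = xs.getD k 0 := by
  rw [List.getD_eq_getElem?_getD, List.getElem?_set, if_neg h, ← List.getD_eq_getElem?_getD]

lemma find_eq (ls : List Int) (fuel : Nat) (j : Nat) (nxt : List Int)
    (hInv : pvInv ls nxt) (h1 : 1 ≤ j) (h2 : j ≤ ls.length + 1)
    (hf : ls.length + 2 - j ≤ fuel) :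
    ∃ nxt', solutionAltFind fuel (j : Int) ls nxt = ((pvF ls j : Int), nxt') ∧ pvInv ls nxt' := by
  induction fuel generalizing j nxt with
  | zero => omega
  | succ f ih =>
    simp only [solutionAltFind]
    by_cases hgt : ls.length < j
    · rw [if_pos (by exact_mod_cast hgt)]
      have hj : j = ls.length + 1 := by omega
      subst hj
      exact ⟨nxt, by rw [pvF_top], hInv⟩
    · rw [if_neg (by push_neg; exact_mod_cast Nat.not_lt.mp hgt)]
      have hjle : j ≤ ls.length := Nat.not_lt.mp hgt
      have hcastidx : (j : Int) - 1 = ((j - 1 : Nat) : Int) := by omega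
      by_cases hact : ls.getD (j - 1) 0 = 0
      · rw [if_neg (by rw [hcastidx, PySem.List.pyGetD_natCast]; simp [List.getD_eq_getElem?_getD] at hact ⊢; simp [hact])]
        obtain ⟨hlen, hks⟩ := hInv
        obtain ⟨c1, c2, c3⟩ := hks j hjle
        rw [PySem.List.pyGetD_natCast]
        set j2I := nxt.getD j 0 with hj2I
        have hj2nn : 0 ≤ j2I := le_of_lt (lt_of_le_of_lt (by exact_mod_cast Nat.zero_le j) c1)
        set j2 := j2I.toNat with hj2
        have hj2cast : j2I = (j2 : Int) := by omega
        have hj2lo : j < j2 := by omega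
        have hj2hi : j2 ≤ ls.length + 1 := by omega
        obtain ⟨nxt', heq, hInv'⟩ := ih j2 nxt ⟨hlen, hks⟩ (by omega) hj2hi (by omega)
        rw [hj2cast, heq]
        have hdead : ∀ r, j ≤ r → r < j2 → ls.getD (r - 1) 0 = 0 := by
          intro r hr1 hr2
          rcases Nat.eq_or_lt_of_le hr1 with heq' | hlt'
          · rw [← heq']; exact hact
          · exact c3 r hlt' (by omega)
        have hskip : pvF ls j = pvF ls j2 := pvF_skip ls j j2 h1 (le_of_lt hj2lo) hj2hi hdead
        rw [PySem.List.pySetD_natCast, ← hskip]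
        have hFgt : j < pvF ls j := by
          rcases Nat.lt_or_ge j (pvF ls j) with h | h
          · exact h
          · exfalso
            have hFj : pvF ls j = j := le_antisymm h (pvF_ge ls j)
            exact pvF_active ls j h1 (by omega) (by rw [hFj]; exact hact)
        refine ⟨nxt'.set j (pvF ls j), rfl, ?_, ?_⟩
        · rw [List.length_set]; exact hInv'.1
        · intro k hk
          by_cases hkj : k = j
          · subst hkj
            rw [getD_set_eq _ _ _ (by rw [hInv'.1]; omega)]
            refine ⟨by exact_mod_cast hFgt, by exact_mod_cast pvF_le ls k h1 h2, ?_⟩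
            intro r hr1 hr2
            exact pvF_dead_below ls k h1 r (le_of_lt hr1) (by exact_mod_cast hr2)
          · rw [getD_set_ne _ _ _ _ (fun hc => hkj hc.symm)]
            exact hInv'.2 k hk
      · rw [if_pos (by rw [hcastidx, PySem.List.pyGetD_natCast]; simp [List.getD_eq_getElem?_getD] at hact ⊢; simp [hact])]
        have hdz : pvLZ (ls.drop (j - 1)) = 0 := by
          apply pvLZ_zero_of_active
          rw [List.getD_eq_getElem?_getD, List.getElem?_drop]
          simpa [List.getD_eq_getElem?_getD] using hact
        have hF : pvF ls j = j := by simp [pvF, hdz]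
        exact ⟨nxt, by rw [hF], hInv⟩

lemma solutionAltFind_succ (f : Nat) (j : Int) (alive nxt : List Int) :
    solutionAltFind (f + 1) j alive nxt =
      if (alive.length : Int) < j then (j, nxt)
      else if PySem.List.pyGetD alive (j - 1) 0 ≠ 0 then (j, nxt)
      else
        let r := solutionAltFind f (PySem.List.pyGetD nxt j 0) alive nxt
        (r.1, PySem.List.pySetD r.2 j r.1) := rfl

lemma pySetD_zero (xs : List Int) (v : Int) : PySem.List.pySetD xs 0 v = xs.set 0 v :=
  PySem.List.pySetD_of_nonneg xs v (le_refl 0)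

lemma find_zero (ls : List Int) (nxt : List Int) (hne : ls ≠ [])
    (hdead : ∀ k < ls.length, ls.getD k 0 = 0) (hInv : pvInv ls nxt) :
    ∃ nxt', solutionAltFind (ls.length + 2) 0 ls nxt = ((ls.length : Int) + 1, nxt') ∧
      pvInv ls nxt' := by
  have hpos : 0 < ls.length := List.length_pos_of_ne_nil hne
  rw [show ls.length + 2 = (ls.length + 1) + 1 from rfl]
  rw [solutionAltFind_succ]
  rw [if_neg (Int.not_lt.mpr (Int.natCast_nonneg _))]
  have hlast : PySem.List.pyGetD ls (-1) 0 = 0 := by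
    rw [PySem.List.pyGetD_neg_one ls 0 hne, List.getLast_eq_getElem hne]
    have hd := hdead (ls.length - 1) (by omega)
    rw [List.getD_eq_getElem?_getD, List.getElem?_eq_getElem (by omega)] at hd
    simpa using hd
  rw [if_neg (by rw [show (0 : Int) - 1 = -1 by ring]; simp [hlast])]
  rw [PySem.List.pyGetD_zero]
  obtain ⟨hlen, hks⟩ := hInv
  obtain ⟨c1, c2, c3⟩ := hks 0 (Nat.zero_le _)
  set j2I := nxt.getD 0 0 with hj2I
  have hj2nn : 0 < j2I := by exact_mod_cast c1
  set j2 := j2I.toNat with hj2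
  have hj2cast : j2I = (j2 : Int) := by omega
  have hj2hi : j2 ≤ ls.length + 1 := by omega
  obtain ⟨nxt', heq, hInv'⟩ := find_eq ls (ls.length + 1) j2 nxt ⟨hlen, hks⟩ (by omega) hj2hi (by omega)
  rw [hj2cast, heq]
  have hF : pvF ls j2 = ls.length + 1 := by
    rw [pvF_skip ls j2 (ls.length + 1) (by omega) hj2hi (le_refl _)
      (fun r hr1 hr2 => hdead (r - 1) (by omega)), pvF_top]
  dsimp only
  rw [hF, pySetD_zero]
  refine ⟨nxt'.set 0 (((ls.length + 1 : Nat) : Int)), ?_, ?_, ?_⟩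
  · push_cast; rfl
  · rw [List.length_set]; exact hInv'.1
  · intro k hk
    by_cases hk0 : k = 0
    · subst hk0
      rw [getD_set_eq _ _ _ (by rw [hInv'.1]; omega)]
      refine ⟨by exact_mod_cast Nat.succ_pos ls.length, by push_cast; exact le_refl _,
        fun r hr1 hr2 => hdead (r - 1) (by omega)⟩
    · rw [getD_set_ne _ _ _ _ (fun hc => hk0 hc.symm)]
      exact hInv'.2 k hk

-- ===== state correspondence =====

def pvRowSt (n : Int) (ls : List Int) (mr : Int) (nxt : List Int) : Prop :=
  ls.length = n.toNat ∧
  ((n ≤ 0 ∧ mr = 1) ∨ (1 ≤ n ∧ pvInv ls nxt ∧ mr = pvClip ls.length (pvF ls 1)))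

lemma pySetD_norm (ls : List Int) (i v : Int) (h1 : -(ls.length : Int) ≤ i) (h2 : i < (ls.length : Int)) :
    PySem.List.pySetD ls i v = ls.set (if i < 0 then (i + ls.length).toNat else i.toNat) v := by
  by_cases hneg : i < 0
  · have hcast : (ls.length - (-i).toNat) = (i + ls.length).toNat := by omega
    simp [PySem.List.pySetD, PySem.List.pySet?, PySem.List.pyIdx?,
      if_neg (by omega : ¬ (0:Int) ≤ i), if_pos h1, hcast, hneg]
  · simp [PySem.List.pySetD, PySem.List.pySet?, PySem.List.pyIdx?,
      if_pos (by omega : (0:Int) ≤ i), if_pos h2, hneg]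

lemma set_zero_dead (ls : List Int) (p k : Nat) (h : ls.getD k 0 = 0) :
    (ls.set p 0).getD k 0 = 0 := by
  rw [List.getD_eq_getElem?_getD, List.getElem?_set]
  rw [List.getD_eq_getElem?_getD] at h
  split
  · split <;> simp
  · exact h

lemma pvInv_mono (ls nxt : List Int) (p : Nat) (hInv : pvInv ls nxt) :
    pvInv (ls.set p 0) nxt := by
  obtain ⟨hl, hk⟩ := hInv
  refine ⟨by simpa using hl, fun k hkle => ?_⟩
  simp only [List.length_set] at hkle ⊢
  obtain ⟨c1, c2, c3⟩ := hk k hkle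
  exact ⟨c1, by simpa using c2, fun r hr1 hr2 => set_zero_dead _ _ _ (c3 r hr1 hr2)⟩

-- the type-1/2 step: both programs compute the same new minimum, invariant preserved
lemma step_row (n : Int) (ls : List Int) (mr : Int) (nxt : List Int) (q1 : Int)
    (hSt : pvRowSt n ls mr nxt) (hlo : 1 - n ≤ q1) (hhi : q1 ≤ n) :
    let ls' := PySem.List.pySetD ls (q1 - 1) 0
    let fr := solutionAltFind (ls'.length + 2) mr ls' nxt
    solutionNext mr ls' = (if fr.1 ≤ n then fr.1 else 0) ∧
      pvRowSt n ls' (if fr.1 ≤ n then fr.1 else 0) fr.2 := by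
  dsimp only
  have hn : 1 ≤ n := by omega
  obtain ⟨hlen, hbr⟩ := hSt
  have hlenn : (ls.length : Int) = n := by omega
  rcases hbr with ⟨h0, _⟩ | ⟨_, hInv, hmr⟩
  · omega
  have hset : PySem.List.pySetD ls (q1 - 1) 0 =
      ls.set (if q1 - 1 < 0 then (q1 - 1 + ls.length).toNat else (q1 - 1).toNat) 0 :=
    pySetD_norm ls (q1 - 1) 0 (by omega) (by omega)
  set p := (if q1 - 1 < 0 then (q1 - 1 + (ls.length : Int)).toNat else (q1 - 1).toNat) with hp
  set ls' := PySem.List.pySetD ls (q1 - 1) 0 with hls'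
  have hls'eq : ls' = ls.set p 0 := hset
  have hlen' : ls'.length = ls.length := by rw [hls'eq, List.length_set]
  have hdead' : ∀ k, ls.getD k 0 = 0 → ls'.getD k 0 = 0 := by
    intro k hk; rw [hls'eq]; exact set_zero_dead ls p k hk
  have hInv' : pvInv ls' nxt := by
    rw [hls'eq]
    have := pvInv_mono ls nxt p hInv
    -- pvInv (ls.set p 0) nxt mentions (ls.set p 0).length = ls.length
    exact this
  by_cases hcase : pvF ls 1 ≤ ls.length
  · -- some row still active: mr = pvF ls 1 ≥ 1
    have hmr' : mr = ((pvF ls 1 : Nat) : Int) := by rw [hmr, pvClip, if_pos hcase]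
    set s := pvF ls 1 with hs
    have hs1 : 1 ≤ s := pvF_ge ls 1
    obtain ⟨nxt', heq, hInv''⟩ := find_eq ls' (ls'.length + 2) s nxt hInv'
      hs1 (by omega) (by omega)
    have hA : solutionNext mr ls' = pvClip ls'.length (pvF ls' s) := by
      rw [hmr']; exact next_eq ls' s hs1 (by omega)
    have hfr : solutionAltFind (ls'.length + 2) mr ls' nxt = ((pvF ls' s : Int), nxt') := by
      rw [hmr']; exact heq
    rw [hA, hfr]
    have hiff : ((pvF ls' s : Nat) : Int) ≤ n ↔ pvF ls' s ≤ ls'.length := by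
      rw [hlen']; omega
    have hclip : (if ((pvF ls' s : Nat) : Int) ≤ n then ((pvF ls' s : Nat) : Int) else 0) =
        pvClip ls'.length (pvF ls' s) := by
      by_cases hc : pvF ls' s ≤ ls'.length
      · rw [if_pos (hiff.mpr hc), pvClip, if_pos hc]
      · rw [if_neg (fun hc' => hc (hiff.mp hc')), pvClip, if_neg hc]
    have hF1 : pvF ls' 1 = pvF ls' s := by
      apply pvF_skip ls' 1 s (le_refl 1) hs1 (by omega)
      intro r hr1 hr2
      exact hdead' (r - 1) (pvF_dead_below ls 1 (le_refl 1) r hr1 hr2)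
    refine ⟨by rw [hclip], hlen' ▸ hlen, Or.inr ⟨hn, hInv'', ?_⟩⟩
    rw [hclip, hF1]
  · -- everything dead already: mr = 0
    have hmr0 : mr = 0 := by rw [hmr, pvClip, if_neg hcase]
    have hdeadls : ∀ k < ls.length, ls.getD k 0 = 0 := by
      intro k hk
      exact pvF_dead_below ls 1 (le_refl 1) (k + 1) (by omega) (by omega)
    have hdeadls' : ∀ k < ls'.length, ls'.getD k 0 = 0 := by
      intro k hk; exact hdead' k (hdeadls k (by omega))
    have hlpos : 0 < ls.length := by omega
    have hne : ls' ≠ [] := by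
      intro hc
      have : ls'.length = 0 := by rw [hc]; rfl
      omega
    obtain ⟨nxt', heq, hInv''⟩ := find_zero ls' nxt hne hdeadls' hInv'
    have hA : solutionNext mr ls' = 0 := by rw [hmr0]; exact next_zero ls' hdeadls'
    have hfr : solutionAltFind (ls'.length + 2) mr ls' nxt = ((ls'.length : Int) + 1, nxt') := by
      rw [hmr0]; exact heq
    rw [hA, hfr]
    have hnotle : ¬ ((ls'.length : Int) + 1 ≤ n) := by rw [hlen']; omega
    rw [if_neg hnotle]
    refine ⟨rfl, hlen' ▸ hlen, Or.inr ⟨hn, hInv'', ?_⟩⟩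
    have hlz : pvLZ ls' = ls'.length := pvLZ_eq_length ls' hdeadls'
    simp only [pvClip, pvF, Nat.sub_self, List.drop_zero, hlz]
    rw [if_neg (by omega)]

lemma fold_eq (n m : Int) (queries : List (List Int))
    (hPre : ∀ q ∈ queries, q ≠ [] ∧
      (PySem.List.pyGetD q 0 0 = 1 →
        2 ≤ q.length ∧ 1 - n ≤ PySem.List.pyGetD q 1 0 ∧ PySem.List.pyGetD q 1 0 ≤ n) ∧
      (PySem.List.pyGetD q 0 0 = 2 →
        2 ≤ q.length ∧ 1 - m ≤ PySem.List.pyGetD q 1 0 ∧ PySem.List.pyGetD q 1 0 ≤ m)) :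
    ∀ rs cs nr nc mr mc ans, pvRowSt n rs mr nr → pvRowSt m cs mc nc →
    (List.foldl solutionStep (rs, cs, mr, mc, ans) queries).2.2.2.2 =
      (List.foldl (solutionAltStep n m) (rs, cs, nr, nc, mr, mc, ans) queries).2.2.2.2.2.2 := by
  induction queries with
  | nil => intro rs cs nr nc mr mc ans _ _; rfl
  | cons q rest ih =>
    intro rs cs nr nc mr mc ans hR hC
    obtain ⟨hne, hc1, hc2⟩ := hPre q (by simp)
    have hPre' := fun q' hq' => hPre q' (List.mem_cons_of_mem q hq')
    simp only [List.foldl_cons]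
    by_cases hq0 : PySem.List.pyGetD q 0 0 = 0
    · simp only [solutionStep, solutionAltStep, if_pos hq0]
      exact ih hPre' rs cs nr nc mr mc _ hR hC
    · by_cases hq1 : PySem.List.pyGetD q 0 0 = 1
      · obtain ⟨hql, hlo, hhi⟩ := hc1 hq1
        have hstep := step_row n rs mr nr (PySem.List.pyGetD q 1 0) hR hlo hhi
        dsimp only at hstep
        obtain ⟨heqv, hR'⟩ := hstep
        simp only [solutionStep, solutionAltStep, if_neg hq0, if_pos hq1]
        rw [heqv]
        exact ih hPre' _ cs _ nc _ mc ans hR' hC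
      · by_cases hq2 : PySem.List.pyGetD q 0 0 = 2
        · obtain ⟨hql, hlo, hhi⟩ := hc2 hq2
          have hstep := step_row m cs mc nc (PySem.List.pyGetD q 1 0) hC hlo hhi
          dsimp only at hstep
          obtain ⟨heqv, hC'⟩ := hstep
          simp only [solutionStep, solutionAltStep, if_neg hq0, if_neg hq1, if_pos hq2]
          rw [heqv]
          exact ih hPre' rs _ nr _ mr _ ans hR hC'
        · simp only [solutionStep, solutionAltStep, if_neg hq0, if_neg hq1, if_neg hq2]
          exact ih hPre' rs cs nr nc mr mc ans hR hC

lemma init_row (n : Int) :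
    pvRowSt n (List.replicate n.toNat 1) 1 (PySem.List.pyRange 1 (n + 2)) := by
  refine ⟨by simp, ?_⟩
  rcases (by omega : n ≤ 0 ∨ 0 < n) with h | h
  · exact Or.inl ⟨h, rfl⟩
  · have hlenr : (List.replicate n.toNat (1 : Int)).length = n.toNat := by simp
    have hlenx : (PySem.List.pyRange 1 (n + 2)).length = n.toNat + 1 := by
      rw [PySem.List.length_pyRange_one]; omega
    refine Or.inr ⟨h, ⟨by rw [hlenx, hlenr], ?_⟩, ?_⟩
    · intro k hk
      rw [hlenr] at hk
      have hgd : (PySem.List.pyRange 1 (n + 2)).getD k 0 = 1 + (k : Int) := by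
        rw [List.getD_eq_getElem?_getD,
          List.getElem?_eq_getElem (by rw [hlenx]; omega),
          PySem.List.getElem_pyRange_one]
        rfl
      rw [hgd]
      refine ⟨by omega, by omega, fun r hr1 hr2 => absurd (by omega : r ≤ k) (by omega)⟩
    · have hlz : pvLZ (List.replicate n.toNat (1 : Int)) = 0 := by
        obtain ⟨k, hk⟩ : ∃ k, n.toNat = k + 1 := ⟨n.toNat - 1, by omega⟩
        rw [hk, List.replicate_succ]
        simp [pvLZ]
      simp only [pvClip, pvF, Nat.sub_self, List.drop_zero, hlz]
      rw [if_pos (by omega)]; norm_num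

-- ===== VERDICT (by name: the statement is the Claim_ definition above) =====
theorem solution_spec : Claim_equal_solution := by
  intro n m queries _hDom hPre
  unfold Spec_solution solution solution_alt
  exact fold_eq n m queries hPre _ _ _ _ _ _ _ (init_row n) (init_row m)
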